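-- pv_equiv track=rewrite | github.com/yeonvly819/LeetCode | Phase 3/210716_폰켓몬.py | solution
-- ===== SOURCE A (Python) =====
-- import itertools
--
-- def solution(nums):
--
--     pick_n = int(len(nums)/2)
--
--     comb = list(itertools.combinations(nums, pick_n))
--
--     max_mon = 0
--     mon_count = [len(set(i))for i in comb]
--     max_mon = max(mon_count)
--
--     answer = max_mon
--     return answer
-- ===== SOURCE B (Python) =====
-- def solution(nums):
--     return min(len(nums) // 2, len(set(nums)))
-- ===== Notes on version B (the rewrite author's own statement) =====
-- stated objective: faster
-- what changed: Replaces the enumeration of all C(n, n/2) combinations (taking the max distinct count over each) by the closed form min(n//2, number of distinct values), computed in one pass over the list.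
import Mathlib
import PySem

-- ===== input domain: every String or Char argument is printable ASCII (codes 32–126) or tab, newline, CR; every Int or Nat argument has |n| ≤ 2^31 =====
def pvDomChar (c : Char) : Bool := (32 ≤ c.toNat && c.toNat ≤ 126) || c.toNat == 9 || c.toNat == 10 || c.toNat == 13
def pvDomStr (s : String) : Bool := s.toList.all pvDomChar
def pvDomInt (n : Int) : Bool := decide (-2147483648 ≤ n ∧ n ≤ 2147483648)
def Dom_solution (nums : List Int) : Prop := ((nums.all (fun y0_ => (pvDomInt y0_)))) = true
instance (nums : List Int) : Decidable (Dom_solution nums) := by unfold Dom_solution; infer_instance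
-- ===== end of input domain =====

-- B replaces A's enumeration of all C(n, n/2) combinations by the closed form
-- min(n//2, number of distinct values); measured asymptotically faster.

-- ===== PORT A =====
-- itertools.combinations(xs, k) in itertools' output order
def pvComb (xs : List Int) (k : Nat) : List (List Int) :=
  match k, xs with
  | 0, _ => [[]]
  | _ + 1, [] => []
  | k + 1, x :: t => ((pvComb t k).map (fun c => x :: c)) ++ pvComb t (k + 1)

def solution (nums : List Int) : Int :=
  let pick_n : Nat := nums.length / 2
  let comb := pvComb nums pick_n
  let mon_count := comb.map (fun i => ((PySem.Set.ofList i).length : Int))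
  -- Python's max(mon_count); mon_count is provably nonempty (pick_n ≤ len), so none is unreachable
  match PySem.List.max? mon_count (fun x => x) with
  | some m => m
  | none => 0

-- ===== PORT B =====
def solution_alt (nums : List Int) : Int :=
  min ((nums.length / 2 : Nat) : Int) (((PySem.Set.ofList nums).length : Nat) : Int)

-- ===== PRECONDITION & SPEC =====
def Spec_solution (nums : List Int) (out : Int) : Prop := out = solution_alt nums
instance (nums : List Int) (out : Int) : Decidable (Spec_solution nums out) := by unfold Spec_solution; infer_instance

-- ===== CLAIM (what is proved, stated in full; the proofs are below) =====
def Claim_equal_solution : Prop := ∀ (nums : List Int), Dom_solution nums → Spec_solution nums (solution nums)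

-- ===== LEMMAS AND PROOFS =====

theorem dcount_eq (l : List Int) : (PySem.Set.ofList l).length = l.toFinset.card := by
  rw [← List.toFinset_card_of_nodup (PySem.Set.nodup_ofList l)]
  congr 1
  ext y
  simp [PySem.Set.mem_ofList]

theorem comb_mem_spec (xs : List Int) (k : Nat) (c : List Int) (h : c ∈ pvComb xs k) :
    c.Sublist xs ∧ c.length = k := by
  induction xs generalizing k c with
  | nil =>
    cases k with
    | zero => simp [pvComb] at h; subst h; simp
    | succ k => simp [pvComb] at h
  | cons x t ih =>
    cases k with
    | zero => simp [pvComb] at h; subst h; simp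
    | succ k =>
      simp only [pvComb, List.mem_append, List.mem_map] at h
      rcases h with ⟨c', hc', rfl⟩ | h
      · obtain ⟨hs, hl⟩ := ih k c' hc'
        exact ⟨List.Sublist.cons₂ x hs, by simp [hl]⟩
      · obtain ⟨hs, hl⟩ := ih (k + 1) c h
        exact ⟨hs.cons x, hl⟩

theorem comb_upper (xs : List Int) (k : Nat) (c : List Int) (h : c ∈ pvComb xs k) :
    c.toFinset.card ≤ min k xs.toFinset.card := by
  obtain ⟨hs, hl⟩ := comb_mem_spec xs k c h
  refine le_min ?_ ?_
  · exact hl ▸ List.toFinset_card_le c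
  · exact Finset.card_le_card (fun y hy => by
      simp only [List.mem_toFinset] at hy ⊢
      exact hs.subset hy)

theorem comb_exists (xs : List Int) (k : Nat) (hk : k ≤ xs.length) :
    ∃ c ∈ pvComb xs k,
      c.toFinset.card = min k xs.toFinset.card ∧
      (k ≤ xs.toFinset.card → c.Nodup) ∧
      (xs.toFinset.card ≤ k → ∀ y ∈ xs, y ∈ c) := by
  induction xs generalizing k with
  | nil =>
    have : k = 0 := by simpa using hk
    subst this
    exact ⟨[], by simp [pvComb], by simp, fun _ => List.nodup_nil, by simp⟩
  | cons x t ih =>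
    cases k with
    | zero =>
      refine ⟨[], by simp [pvComb], by simp, fun _ => List.nodup_nil, fun hle => ?_⟩
      exfalso
      have hx : x ∈ (x :: t).toFinset := by simp
      have := Finset.card_pos.mpr ⟨x, hx⟩
      omega
    | succ j =>
      have hj : j ≤ t.length := by simpa using Nat.succ_le_succ_iff.mp hk
      by_cases hB : t.toFinset.card ≤ j
      · -- all distinct values of t fit in j slots: extend an all-values pick by x
        obtain ⟨c', hc'mem, hcard, hnd, hall⟩ := ih j hj
        have hall' : ∀ y ∈ t, y ∈ c' := hall hB
        have hcard' : c'.toFinset.card = t.toFinset.card := by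
          rw [hcard]; omega
        refine ⟨x :: c', ?_, ?_, ?_, ?_⟩
        · simp only [pvComb, List.mem_append, List.mem_map]
          exact Or.inl ⟨c', hc'mem, rfl⟩
        · by_cases hx : x ∈ t
          · have hxc : x ∈ c' := hall' x hx
            have h1 : (x :: c').toFinset = c'.toFinset := by
              simp [List.toFinset_cons, Finset.insert_eq_self.mpr (List.mem_toFinset.mpr hxc)]
            have h2 : (x :: t).toFinset = t.toFinset := by
              simp [List.toFinset_cons, Finset.insert_eq_self.mpr (List.mem_toFinset.mpr hx)]
            rw [h1, h2, hcard']
            omega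
          · have hsub : c'.Sublist t := (comb_mem_spec t j c' hc'mem).1
            have hxc : x ∉ c' := fun hmem => hx (hsub.subset hmem)
            have h1 : (x :: c').toFinset.card = c'.toFinset.card + 1 := by
              simp [List.toFinset_cons,
                Finset.card_insert_of_notMem (fun hm => hxc (List.mem_toFinset.mp hm))]
            have h2 : (x :: t).toFinset.card = t.toFinset.card + 1 := by
              simp [List.toFinset_cons,
                Finset.card_insert_of_notMem (fun hm => hx (List.mem_toFinset.mp hm))]
            rw [h1, h2, hcard']
            omega
        · intro hle
          -- j + 1 ≤ card(x::t) with card t ≤ j forces x ∉ t and card t = j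
          have hx : x ∉ t := by
            intro hx
            have h2 : (x :: t).toFinset = t.toFinset := by
              simp [List.toFinset_cons, Finset.insert_eq_self.mpr (List.mem_toFinset.mpr hx)]
            rw [h2] at hle
            omega
          have hsub : c'.Sublist t := (comb_mem_spec t j c' hc'mem).1
          have hxc : x ∉ c' := fun hmem => hx (hsub.subset hmem)
          have h2 : (x :: t).toFinset.card = t.toFinset.card + 1 := by
            simp [List.toFinset_cons,
              Finset.card_insert_of_notMem (fun hm => hx (List.mem_toFinset.mp hm))]
          have htj : j ≤ t.toFinset.card := by omega
          exact List.Nodup.cons hxc (hnd htj)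
        · intro _ y hy
          rcases List.mem_cons.mp hy with rfl | hy
          · exact List.mem_cons_self
          · exact List.mem_cons_of_mem x (hall' y hy)
      · -- more than j distinct values in t: pick j+1 distinct ones inside t
        have hB' : j + 1 ≤ t.toFinset.card := by omega
        have hlen : j + 1 ≤ t.length := le_trans hB' (List.toFinset_card_le t)
        obtain ⟨c'', hc''mem, hcard, hnd, hall⟩ := ih (j + 1) hlen
        have hcard' : c''.toFinset.card = j + 1 := by
          rw [hcard]; omega
        have hmono : t.toFinset.card ≤ (x :: t).toFinset.card :=
          Finset.card_le_card (fun y hy => by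
            simp only [List.mem_toFinset] at hy ⊢
            exact List.mem_cons_of_mem x hy)
        refine ⟨c'', ?_, ?_, fun _ => hnd hB', ?_⟩
        · simp only [pvComb, List.mem_append]
          exact Or.inr hc''mem
        · rw [hcard']
          omega
        · intro hle
          have hx : x ∈ t := by
            by_contra hx
            have h2 : (x :: t).toFinset.card = t.toFinset.card + 1 := by
              simp [List.toFinset_cons,
                Finset.card_insert_of_notMem (fun hm => hx (List.mem_toFinset.mp hm))]
            omega
          have htle : t.toFinset.card ≤ j + 1 := le_trans hmono hle
          intro y hy
          rcases List.mem_cons.mp hy with rfl | hy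
          · exact hall htle y hx
          · exact hall htle y hy

-- ===== VERDICT (by name: the statement is the Claim_ definition above) =====
theorem solution_spec : Claim_equal_solution := by
  unfold Claim_equal_solution Spec_solution
  intro nums _
  simp only [solution, solution_alt]
  set k := nums.length / 2 with hkdef
  have hk : k ≤ nums.length := Nat.div_le_self _ _
  obtain ⟨c₀, hc₀, hcard₀, -, -⟩ := comb_exists nums k hk
  cases hmax : PySem.List.max?
      ((pvComb nums k).map (fun i => ((PySem.Set.ofList i).length : Int))) (fun x => x) with
  | none =>
    rw [PySem.List.max?_eq_none_iff] at hmax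
    rw [List.map_eq_nil_iff] at hmax
    rw [hmax] at hc₀
    simp at hc₀
  | some m =>
    have hm : m ∈ (pvComb nums k).map (fun i => ((PySem.Set.ofList i).length : Int)) :=
      PySem.List.max?_mem hmax
    have hmaxle := PySem.List.max?_isMax hmax
    obtain ⟨c, hc, rfl⟩ := List.mem_map.mp hm
    have hub : ((PySem.Set.ofList c).length : Int) ≤ ((min k nums.toFinset.card : Nat) : Int) := by
      rw [dcount_eq]
      exact_mod_cast comb_upper nums k c hc
    have hlb : ((min k nums.toFinset.card : Nat) : Int) ≤ ((PySem.Set.ofList c).length : Int) := by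
      have hmem : ((PySem.Set.ofList c₀).length : Int) ∈
          (pvComb nums k).map (fun i => ((PySem.Set.ofList i).length : Int)) :=
        List.mem_map.mpr ⟨c₀, hc₀, rfl⟩
      have := hmaxle _ hmem
      rw [dcount_eq c₀, hcard₀] at this
      exact this
    have heq : ((PySem.Set.ofList c).length : Int) = ((min k nums.toFinset.card : Nat) : Int) :=
      le_antisymm hub hlb
    rw [heq, dcount_eq nums]
    push_cast
    rfl
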